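-- pv_equiv track=rewrite | github.com/Chairmichael/MSY | Python/Steamly/SteamLevel.py | get_xp
-- ===== SOURCE A (Python) =====
-- def get_xp(target, current=1):
--     mult = 1
--     total_xp = 0
--     for l in range(1, target+1):
--         if l >= current:
--             total_xp += mult * 100
--         if l % 10 == 0: mult += 1
--     return total_xp
-- ===== SOURCE B (Python) =====
-- def get_xp(target, current=1):
--     # Closed form: level l grants 100 * (1 + (l-1)//10) XP; sum the
--     # arithmetic-series-in-blocks prefix function S at both ends.
--     def S(n):
--         if n <= 0:
--             return 0
--         q, r = divmod(n, 10)
--         return n + 5 * q * (q - 1) + q * r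
--     lo = max(current, 1)
--     if target < lo:
--         return 0
--     return 100 * (S(target) - S(lo - 1))
-- ===== Notes on version B (the rewrite author's own statement) =====
-- stated objective: faster
-- what changed: Replaced the O(target) level-by-level loop with an O(1) closed-form prefix sum S(n) over the 10-level multiplier blocks, evaluated at target and current-1.
import Mathlib
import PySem

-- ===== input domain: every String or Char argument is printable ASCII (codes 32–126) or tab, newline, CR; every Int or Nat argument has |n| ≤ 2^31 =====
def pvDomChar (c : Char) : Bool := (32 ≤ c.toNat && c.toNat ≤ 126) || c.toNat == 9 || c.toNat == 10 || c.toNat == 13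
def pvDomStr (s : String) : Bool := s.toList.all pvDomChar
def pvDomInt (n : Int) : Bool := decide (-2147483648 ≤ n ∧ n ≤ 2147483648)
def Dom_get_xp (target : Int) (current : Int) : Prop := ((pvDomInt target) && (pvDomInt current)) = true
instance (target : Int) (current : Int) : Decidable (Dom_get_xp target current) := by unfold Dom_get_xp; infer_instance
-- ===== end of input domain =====

-- B replaces A's level-by-level loop by a closed-form prefix sum over the 10-level
-- multiplier blocks (objective: faster, O(1) instead of O(target)).

-- ===== PORT A =====
-- one loop body step: state (mult, total_xp), level l
def pvStepA (current : Int) (s : Int × Int) (l : Int) : Int × Int :=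
  let s := if current ≤ l then (s.1, s.2 + s.1 * 100) else s
  if PySem.Int.mod l 10 = 0 then (s.1 + 1, s.2) else s

def get_xp (target : Int) (current : Int) : Int :=
  ((PySem.List.pyRange 1 (target + 1) 1).foldl (pvStepA current) (1, 0)).2

-- ===== PORT B =====
-- S(n) from Source B: prefix sum of per-level XP multipliers 1 + (l-1)//10 for l = 1..n
def pvS (n : Int) : Int :=
  if n ≤ 0 then 0
  else
    let q := PySem.Int.floordiv n 10
    let r := PySem.Int.mod n 10
    n + 5 * q * (q - 1) + q * r

def get_xp_alt (target : Int) (current : Int) : Int :=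
  let lo := max current 1
  if target < lo then 0 else 100 * (pvS target - pvS (lo - 1))

-- ===== PRECONDITION & SPEC =====
def Spec_get_xp (target : Int) (current : Int) (out : Int) : Prop := out = get_xp_alt target current
instance (target : Int) (current : Int) (out : Int) : Decidable (Spec_get_xp target current out) := by unfold Spec_get_xp; infer_instance

-- ===== CLAIM (what is proved, stated in full; the proofs are below) =====
def Claim_equal_get_xp : Prop := ∀ (target : Int) (current : Int), Dom_get_xp target current → Spec_get_xp target current (get_xp target current)

-- ===== LEMMAS AND PROOFS =====

theorem pvS_natCast (n : Nat) : pvS (n : Int) =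
    (n : Int) + 5 * ((n / 10 : Nat) : Int) * (((n / 10 : Nat) : Int) - 1)
      + ((n / 10 : Nat) : Int) * ((n % 10 : Nat) : Int) := by
  rcases Nat.eq_zero_or_pos n with h | h
  · subst h; simp [pvS]
  · unfold pvS
    rw [if_neg (by omega)]
    simp

-- the per-level increment: S(n+1) - S(n) = 1 + n/10
theorem pvS_succ (n : Nat) : pvS ((n : Int) + 1) = pvS (n : Int) + 1 + ((n / 10 : Nat) : Int) := by
  have h1 : ((n : Int) + 1) = (((n + 1 : Nat)) : Int) := by push_cast; ring
  rw [h1, pvS_natCast, pvS_natCast]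
  obtain ⟨q, r, hr, hn⟩ : ∃ q r, r < 10 ∧ n = 10 * q + r := ⟨n / 10, n % 10, Nat.mod_lt _ (by omega), (Nat.div_add_mod n 10).symm ▸ by omega⟩
  subst hn
  rcases Nat.lt_or_ge r 9 with h9 | h9
  · have e1 : (10 * q + r) / 10 = q := by omega
    have e2 : (10 * q + r) % 10 = r := by omega
    have e3 : (10 * q + r + 1) / 10 = q := by omega
    have e4 : (10 * q + r + 1) % 10 = r + 1 := by omega
    rw [e1, e2, e3, e4]; push_cast; ring
  · have hr9 : r = 9 := by omega
    subst hr9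
    have e1 : (10 * q + 9) / 10 = q := by omega
    have e2 : (10 * q + 9) % 10 = 9 := by omega
    have e3 : (10 * q + 9 + 1) / 10 = q + 1 := by omega
    have e4 : (10 * q + 9 + 1) % 10 = 0 := by omega
    rw [e1, e2, e3, e4]; push_cast; ring

-- loop invariant: after processing levels 1..n the state is
-- (1 + n/10, closed form of the total)
theorem loopA_closed (current : Int) (n : Nat) :
    (PySem.List.pyRange 1 ((n : Int) + 1) 1).foldl (pvStepA current) (1, 0)
    = (1 + ((n / 10 : Nat) : Int),
       if (n : Int) < max current 1 then 0 else 100 * (pvS (n : Int) - pvS (max current 1 - 1))) := by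
  induction n with
  | zero =>
      rw [show ((0 : Nat) : Int) + 1 = 1 by norm_num, PySem.List.pyRange_one_eq_nil (by omega)]
      simp only [List.foldl_nil, Nat.cast_zero, Nat.zero_div]
      rw [if_pos (lt_of_lt_of_le zero_lt_one (le_max_right current 1))]
      norm_num
  | succ m ih =>
      have hcast : (((m + 1 : Nat)) : Int) = (m : Int) + 1 := by push_cast; ring
      have hsplit : PySem.List.pyRange 1 (((m + 1 : Nat) : Int) + 1) 1
          = PySem.List.pyRange 1 ((m : Int) + 1) 1 ++ [(m : Int) + 1] := by
        rw [hcast, PySem.List.pyRange_one_succ_right (by omega)]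
      have hmod : PySem.Int.mod ((m : Int) + 1) 10 = (((m + 1) % 10 : Nat) : Int) := by
        rw [← hcast]; exact PySem.Int.mod_natCast (m + 1) 10
      rw [hsplit, List.foldl_append, ih]
      simp only [List.foldl_cons, List.foldl_nil, pvStepA]
      rw [hmod, hcast]
      set L := max current 1 with hL
      have hL1 : 1 ≤ L := le_max_right _ _
      have hS := pvS_succ m
      by_cases h10 : (((m + 1) % 10 : Nat) : Int) = 0
      · rw [if_pos h10, show (m + 1) / 10 = m / 10 + 1 from by omega]
        by_cases hc : current ≤ (m : Int) + 1
        · have hcL : L ≤ (m : Int) + 1 := max_le hc (by omega)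
          rw [if_pos hc]
          by_cases hm : ((m : Int)) < L
          · rw [if_pos hm, if_neg (show ¬((m : Int) + 1 < L) from by omega),
                show L - 1 = (m : Int) from by omega, hS]
            refine Prod.ext ?_ ?_ <;> dsimp only <;> push_cast <;> ring
          · rw [if_neg hm, if_neg (show ¬((m : Int) + 1 < L) from by omega), hS]
            refine Prod.ext ?_ ?_ <;> dsimp only <;> push_cast <;> ring
        · have hmL : (m : Int) + 1 < L :=
            lt_of_lt_of_le (by omega) (le_max_left current 1)
          rw [if_neg hc, if_pos (show ((m : Int)) < L from by omega), if_pos hmL]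
          refine Prod.ext ?_ ?_ <;> dsimp only <;> push_cast <;> ring
      · rw [if_neg h10, show (m + 1) / 10 = m / 10 from by omega]
        by_cases hc : current ≤ (m : Int) + 1
        · have hcL : L ≤ (m : Int) + 1 := max_le hc (by omega)
          rw [if_pos hc]
          by_cases hm : ((m : Int)) < L
          · rw [if_pos hm, if_neg (show ¬((m : Int) + 1 < L) from by omega),
                show L - 1 = (m : Int) from by omega, hS]
            refine Prod.ext ?_ ?_ <;> dsimp only <;> push_cast <;> ring
          · rw [if_neg hm, if_neg (show ¬((m : Int) + 1 < L) from by omega), hS]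
            refine Prod.ext ?_ ?_ <;> dsimp only <;> push_cast <;> ring
        · have hmL : (m : Int) + 1 < L :=
            lt_of_lt_of_le (by omega) (le_max_left current 1)
          rw [if_neg hc, if_pos (show ((m : Int)) < L from by omega), if_pos hmL]

-- ===== VERDICT (by name: the statement is the Claim_ definition above) =====
theorem get_xp_spec : Claim_equal_get_xp := by
  intro target current _
  unfold Spec_get_xp get_xp get_xp_alt
  rcases Int.lt_or_le target 1 with ht | ht
  · rw [PySem.List.pyRange_one_eq_nil (by omega)]
    simp only [List.foldl_nil]
    rw [if_pos (by have := le_max_right current 1; omega)]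
  · have hn : target = ((target.toNat : Nat) : Int) := by omega
    rw [hn, loopA_closed]
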